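-- pv_equiv track=rewrite | github.com/omnp/shiny-spoon | sat.py | generate_full_alt
-- ===== SOURCE A (Python) =====
-- def add_element(x, e):
--     return clause(set(x).union({e}))
--
-- def clause(x):
--     return tuple(sorted(set(x),key=abs))
--
-- def generate_full_alt(a, j=2, k=3, full=False):
--     """
--     a is an assignment
--     Generates a set of clauses given an assignment (set of literals).
--     """
--     vs = {abs(e) for e in a}
--     xs = [()]
--     for x in xs:
--         if len(x) < k:
--             for v in vs:
--                 for e in [v,-v]:
--                     if e not in x and -e not in x:
--                         y = add_element(x, e)
--                         if y not in xs:
--                             if full or not all(-e in a for e in y):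
--                                 xs.append(y)
--     return {x for x in xs if j <= len(x) <= k}
-- ===== SOURCE B (Python) =====
-- def generate_full_alt(a, j=2, k=3, full=False):
--     """
--     a is an assignment
--     Generates a set of clauses given an assignment (set of literals).
--     Direct combinatorial enumeration instead of a worklist BFS.
--     """
--     vs = sorted({abs(e) for e in a})
--     res = set()
--     if j <= 0 <= k:
--         res.add(())
--     for s in range(max(j, 1), min(k, len(vs)) + 1):
--         for c in _signed_choices(vs, s):
--             if full or not all(-e in a for e in c):
--                 res.add(c)
--     return res
--
-- def _signed_choices(vs, s):
--     # all clauses (tuples sorted by abs) using s distinct variables of vs, each with either sign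
--     if s == 0:
--         return [()]
--     if not vs:
--         return []
--     v, rest = vs[0], vs[1:]
--     return [(e,) + t for e in (v, -v) for t in _signed_choices(rest, s - 1)] + _signed_choices(rest, s)
-- ===== Notes on version B (the rewrite author's own statement) =====
-- stated objective: alternative
-- what changed: A grows a worklist of clauses breadth-first, extending each clause by one literal and re-scanning the whole list for every candidate (`y not in xs`), then filtering sizes at the end; B enumerates the clauses directly by recursing over the sorted variable list, choosing for each size-s variable subset a sign per variable, so clauses are built already sorted-by-abs, each exactly once, with no worklist and no membership scans.
import Mathlib
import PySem

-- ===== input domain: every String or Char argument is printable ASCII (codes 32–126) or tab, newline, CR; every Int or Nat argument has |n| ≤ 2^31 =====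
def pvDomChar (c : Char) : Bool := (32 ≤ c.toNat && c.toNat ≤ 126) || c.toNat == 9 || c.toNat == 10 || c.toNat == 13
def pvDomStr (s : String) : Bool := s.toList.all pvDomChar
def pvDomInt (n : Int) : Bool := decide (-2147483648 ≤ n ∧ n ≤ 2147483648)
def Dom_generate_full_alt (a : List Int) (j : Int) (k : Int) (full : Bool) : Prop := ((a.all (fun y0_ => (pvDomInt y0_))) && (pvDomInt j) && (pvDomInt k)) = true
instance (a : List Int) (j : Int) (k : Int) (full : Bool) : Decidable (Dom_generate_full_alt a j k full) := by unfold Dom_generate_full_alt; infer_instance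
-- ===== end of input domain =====

-- B replaces A's grow-a-worklist BFS (with its repeated `y not in xs` list scans) by a direct
-- recursive enumeration of sign-choices over variable subsets, size by size.  Both Pythons return a
-- SET of clauses; the ports return it in canonical sorted order (set outputs are order-insensitive).

-- ===== PORT A =====
-- def clause(x): return tuple(sorted(set(x),key=abs))
def pvClause (x : List Int) : List Int :=
  PySem.List.sorted (PySem.Set.ofList x) (fun e => |e|)

-- def add_element(x, e): return clause(set(x).union({e}))
def pvAddElement (x : List Int) (e : Int) : List Int :=
  pvClause (PySem.Set.union (PySem.Set.ofList x) [e])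

-- body of "for e in [v,-v]: if e not in x and -e not in x: y=add_element(x,e); if y not in xs: if full or not all(...): xs.append(y)"
def pvStep (a : List Int) (full : Bool) (x : List Int) (xs : List (List Int)) (e : Int) : List (List Int) :=
  if e ∉ x ∧ -e ∉ x then
    let y := pvAddElement x e
    if y ∉ xs then
      if full || !(y.all (fun e2 => decide (-e2 ∈ a))) then xs ++ [y] else xs
    else xs
  else xs

-- "for v in vs: for e in [v,-v]: …"
def pvInner (a : List Int) (full : Bool) (vs : List Int) (x : List Int) (xs : List (List Int)) : List (List Int) :=
  vs.foldl (fun xs v => [v, -v].foldl (pvStep a full x) xs) xs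

-- "for x in xs: …" — xs grows while it is being iterated; fuel only makes the recursion total
-- (the proofs show the loop always finishes the list before the fuel runs out)
def pvLoopA (a : List Int) (k : Int) (full : Bool) (vs : List Int) : Nat → Nat → List (List Int) → List (List Int)
  | 0, _, xs => xs
  | fuel+1, i, xs =>
    if h : i < xs.length then
      pvLoopA a k full vs fuel (i+1)
        (if (xs[i].length : Int) < k then pvInner a full vs xs[i] xs else xs)
    else xs

def generate_full_alt (a : List Int) (j : Int) (k : Int) (full : Bool) : List (List Int) :=
  let vs := PySem.Set.ofList (a.map (fun e => |e|))
  let xs := pvLoopA a k full vs (2 ^ (2 * vs.length) + 1) 0 [[]]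
  -- return {x for x in xs if j <= len(x) <= k}   (a set: returned in canonical sorted order)
  PySem.List.sorted
    (PySem.Set.ofList (xs.filter (fun x => decide (j ≤ (x.length : Int)) && decide ((x.length : Int) ≤ k))))
    (fun x => x)

-- ===== PORT B =====
-- def _signed_choices(vs, s): …
def pvSignedChoices (vs : List Int) (s : Nat) : List (List Int) :=
  match s, vs with
  | 0, _ => [[]]
  | _+1, [] => []
  | s+1, v :: rest =>
    ([v, -v].flatMap (fun e => (pvSignedChoices rest s).map (fun t => e :: t))) ++
      pvSignedChoices rest (s+1)

def generate_full_alt_alt (a : List Int) (j : Int) (k : Int) (full : Bool) : List (List Int) :=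
  let vs := PySem.List.sorted (PySem.Set.ofList (a.map (fun e => |e|))) (fun v => v)
  let res0 : PySem.Set (List Int) :=
    if j ≤ 0 ∧ 0 ≤ k then PySem.Set.add PySem.Set.empty [] else PySem.Set.empty
  let res := (PySem.List.pyRange (max j 1) (min k (vs.length : Int) + 1)).foldl
    (fun res s => (pvSignedChoices vs s.toNat).foldl
      (fun res c =>
        if full || !(c.all (fun e => decide (-e ∈ a))) then PySem.Set.add res c else res) res) res0
  PySem.List.sorted res (fun x => x)

-- ===== PRECONDITION & SPEC =====
def Spec_generate_full_alt (a : List Int) (j : Int) (k : Int) (full : Bool) (out : List (List Int)) : Prop := out = generate_full_alt_alt a j k full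
instance (a : List Int) (j : Int) (k : Int) (full : Bool) (out : List (List Int)) : Decidable (Spec_generate_full_alt a j k full out) := by unfold Spec_generate_full_alt; infer_instance

-- ===== CLAIM (what is proved, stated in full; the proofs are below) =====
def Claim_equal_generate_full_alt : Prop := ∀ (a : List Int) (j : Int) (k : Int) (full : Bool), Dom_generate_full_alt a j k full → Spec_generate_full_alt a j k full (generate_full_alt a j k full)

-- ===== LEMMAS AND PROOFS =====

-- the common characterisation of the returned set
def pvCanon (a : List Int) (y : List Int) : Prop :=
  y.Pairwise (fun p q => |p| < |q|) ∧ ∀ e ∈ y, |e| ∈ a.map (fun e => |e|)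

def pvPass (a : List Int) (full : Bool) (y : List Int) : Prop :=
  full = true ∨ ∃ e ∈ y, -e ∉ a

def pvOK (a : List Int) (j k : Int) (full : Bool) (y : List Int) : Prop :=
  pvCanon a y ∧ j ≤ (y.length : Int) ∧ (y.length : Int) ≤ k ∧ (y = [] ∨ pvPass a full y)

lemma pv_pairwise_nodup {y : List Int} (h : y.Pairwise (fun p q => |p| < |q|)) : y.Nodup := by
  exact h.imp (fun {p q} hpq => by rintro rfl; omega)

lemma pv_map_abs_nodup {y : List Int} (h : y.Pairwise (fun p q => |p| < |q|)) :
    (y.map (fun e => |e|)).Nodup := by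
  exact List.pairwise_map.mpr (h.imp (fun {p q} hpq => by omega))

lemma pv_pass_bool (a : List Int) (full : Bool) (y : List Int) :
    (full || !(y.all (fun e2 => decide (-e2 ∈ a)))) = true ↔ pvPass a full y := by
  simp [pvPass]

lemma pv_addElement_unfold {x : List Int} {e : Int} (hx : x.Nodup) (he : e ∉ x) :
    pvAddElement x e = PySem.List.sorted (x ++ [e]) (fun e => |e|) := by
  unfold pvAddElement pvClause
  rw [PySem.Set.ofList_eq_self_of_nodup x hx]
  have hu : PySem.Set.union x [e] = x ++ [e] := by
    simp [PySem.Set.union, PySem.Set.update, PySem.Set.add, PySem.Set.contains, he]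
  rw [hu, PySem.Set.ofList_eq_self_of_nodup]
  exact (List.perm_append_singleton e x).nodup_iff.mpr (List.nodup_cons.mpr ⟨he, hx⟩)

lemma pv_addElement_spec {x : List Int} {e : Int}
    (hx : x.Pairwise (fun p q => |p| < |q|)) (he : e ∉ x) (hne : -e ∉ x) :
    (pvAddElement x e).Perm (x ++ [e]) ∧ (pvAddElement x e).Pairwise (fun p q => |p| < |q|) := by
  have hnd := pv_pairwise_nodup hx
  rw [pv_addElement_unfold hnd he]
  have hperm := PySem.List.sorted_perm (x ++ [e]) (fun e => |e|) false
  refine ⟨hperm, ?_⟩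
  have hle := PySem.List.sorted_pairwise (x ++ [e]) (fun e => |e|)
  have habs : ∀ z ∈ x, |z| ≠ |e| := by
    intro z hz hzz
    rcases (abs_eq_abs).mp hzz with rfl | rfl
    · exact he hz
    · exact hne (by simpa using hz)
  have hmnd : ((x ++ [e]).map (fun e => |e|)).Nodup := by
    have hx' := pv_map_abs_nodup hx
    simp only [List.map_append, List.map_cons, List.map_nil, List.nodup_append]
    refine ⟨hx', by simp, ?_⟩
    intro z hz
    simp only [List.mem_map] at hz
    obtain ⟨w, hw, rfl⟩ := hz
    simp [habs w hw]
  have hsnd : ((PySem.List.sorted (x ++ [e]) (fun e => |e|)).map (fun e => |e|)).Nodup :=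
    ((hperm.map (fun e => |e|)).nodup_iff).mpr hmnd
  have hne2 : (PySem.List.sorted (x ++ [e]) (fun e => |e|)).Pairwise (fun p q => |p| ≠ |q|) :=
    List.pairwise_map.mp hsnd
  exact (hle.and hne2).imp (fun {p q} h => lt_of_le_of_ne h.1 h.2)

lemma pv_addElement_eq {x : List Int} {e : Int} {y : List Int}
    (hx : x.Pairwise (fun p q => |p| < |q|)) (he : e ∉ x)
    (hy : y.Perm (x ++ [e])) (hp : y.Pairwise (fun p q => |p| < |q|)) :
    pvAddElement x e = y := by
  rw [pv_addElement_unfold (pv_pairwise_nodup hx) he]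
  exact PySem.List.sorted_eq_of_perm_of_pairwise_lt (x ++ [e]) y (fun e => |e|) hy hp

-- invariants of A's worklist
def pvGood (a : List Int) (k : Int) (full : Bool) (y : List Int) : Prop :=
  y = [] ∨ (y.Pairwise (fun p q => |p| < |q|) ∧ (∀ e ∈ y, |e| ∈ a.map (fun e => |e|)) ∧
    1 ≤ (y.length : Int) ∧ (y.length : Int) ≤ k ∧ pvPass a full y)

def pvInv (a : List Int) (k : Int) (full : Bool) (xs : List (List Int)) : Prop :=
  xs.Nodup ∧ ∀ y ∈ xs, pvGood a k full y

def pvChildCond (a : List Int) (k : Int) (full : Bool) (x : List Int) (G : List (List Int)) : Prop :=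
  (x.length : Int) < k → ∀ v ∈ PySem.Set.ofList (a.map (fun e => |e|)), ∀ e ∈ [v, -v],
    e ∉ x → -e ∉ x →
    (full || !((pvAddElement x e).all (fun e2 => decide (-e2 ∈ a)))) = true →
    pvAddElement x e ∈ G

lemma pv_step_cases (a : List Int) (full : Bool) (x : List Int) (xs : List (List Int)) (e : Int) :
    pvStep a full x xs e = xs ∨
    (e ∉ x ∧ -e ∉ x ∧ pvAddElement x e ∉ xs ∧
      (full || !((pvAddElement x e).all (fun e2 => decide (-e2 ∈ a)))) = true ∧
      pvStep a full x xs e = xs ++ [pvAddElement x e]) := by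
  simp only [pvStep]
  split_ifs with h1 h2 h3 <;> tauto

lemma pv_step_prefix (a : List Int) (full : Bool) (x : List Int) (xs : List (List Int)) (e : Int) :
    xs <+: pvStep a full x xs e := by
  rcases pv_step_cases a full x xs e with h | ⟨_, _, _, _, h⟩ <;> rw [h]
  · exact ⟨[pvAddElement x e], rfl⟩

lemma pv_step_mem_child (a : List Int) (full : Bool) (x : List Int) (xs : List (List Int)) (e : Int)
    (h1 : e ∉ x) (h2 : -e ∉ x)
    (h3 : (full || !((pvAddElement x e).all (fun e2 => decide (-e2 ∈ a)))) = true) :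
    pvAddElement x e ∈ pvStep a full x xs e := by
  simp only [pvStep]
  rw [if_pos ⟨h1, h2⟩]
  by_cases hy : pvAddElement x e ∈ xs
  · simp only [hy, not_true_eq_false, if_false]
  · simp only [hy, not_false_eq_true, if_true, h3, if_true]
    exact List.mem_append_right _ (List.mem_singleton_self _)

lemma pv_inner_prefix (a : List Int) (full : Bool) (vs : List Int) (x : List Int)
    (xs : List (List Int)) : xs <+: pvInner a full vs x xs := by
  induction vs generalizing xs with
  | nil => exact List.prefix_rfl
  | cons v tl ih =>
    show xs <+: (tl.foldl _ ([v, -v].foldl (pvStep a full x) xs))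
    refine List.IsPrefix.trans ?_ (ih _)
    exact List.IsPrefix.trans (pv_step_prefix a full x xs v)
      (pv_step_prefix a full x _ (-v))

lemma pv_step_inv (a : List Int) (k : Int) (full : Bool) (x : List Int)
    (xs : List (List Int)) (e : Int)
    (hx : x.Pairwise (fun p q => |p| < |q|)) (hxv : ∀ e' ∈ x, |e'| ∈ a.map (fun e => |e|))
    (hxk : (x.length : Int) < k) (heabs : |e| ∈ a.map (fun e => |e|))
    (hinv : pvInv a k full xs) : pvInv a k full (pvStep a full x xs e) := by
  rcases pv_step_cases a full x xs e with h | ⟨h1, h2, h3, h4, h⟩ <;> rw [h]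
  · exact hinv
  · obtain ⟨hperm, hpw⟩ := pv_addElement_spec hx h1 h2
    refine ⟨?_, ?_⟩
    · exact (List.perm_append_singleton _ _).nodup_iff.mpr (List.nodup_cons.mpr ⟨h3, hinv.1⟩)
    · intro z hz
      rcases List.mem_append.mp hz with hz | hz
      · exact hinv.2 z hz
      · rw [List.mem_singleton] at hz
        subst hz
        refine Or.inr ⟨hpw, ?_, ?_, ?_, (pv_pass_bool a full _).mp h4⟩
        · intro e' he'
          rcases List.mem_append.mp (hperm.mem_iff.mp he') with h' | h'
          · exact hxv e' h'
          · rw [List.mem_singleton] at h'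
            subst h'
            exact heabs
        · have := hperm.length_eq
          simp only [List.length_append, List.length_cons, List.length_nil] at this
          omega
        · have := hperm.length_eq
          simp only [List.length_append, List.length_cons, List.length_nil] at this
          omega

lemma pv_inner_inv (a : List Int) (k : Int) (full : Bool) (vs : List Int) (x : List Int)
    (xs : List (List Int)) (hvs : ∀ v ∈ vs, v ∈ a.map (fun e => |e|) ∧ 0 ≤ v)
    (hx : x.Pairwise (fun p q => |p| < |q|)) (hxv : ∀ e ∈ x, |e| ∈ a.map (fun e => |e|))
    (hxk : (x.length : Int) < k) (hinv : pvInv a k full xs) :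
    pvInv a k full (pvInner a full vs x xs) := by
  induction vs generalizing xs with
  | nil => exact hinv
  | cons v tl ih =>
    show pvInv a k full (tl.foldl _ ([v, -v].foldl (pvStep a full x) xs))
    have hvs' : ∀ w ∈ tl, w ∈ a.map (fun e => |e|) ∧ 0 ≤ w :=
      fun w hw => hvs w (List.mem_cons_of_mem _ hw)
    obtain ⟨hva, hv0⟩ := hvs v (List.mem_cons_self ..)
    have habs1 : |v| ∈ a.map (fun e => |e|) := by rwa [abs_of_nonneg hv0]
    have habs2 : |(-v)| ∈ a.map (fun e => |e|) := by rwa [abs_neg, abs_of_nonneg hv0]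
    have hinv' : pvInv a k full ([v, -v].foldl (pvStep a full x) xs) := by
      simp only [List.foldl_cons, List.foldl_nil]
      exact pv_step_inv a k full x _ (-v) hx hxv hxk habs2
        (pv_step_inv a k full x xs v hx hxv hxk habs1 hinv)
    exact ih _ hvs' hinv'

lemma pv_inner_closed (a : List Int) (full : Bool) (vs : List Int) (x : List Int)
    (xs : List (List Int)) :
    ∀ v ∈ vs, ∀ e ∈ [v, -v], e ∉ x → -e ∉ x →
      (full || !((pvAddElement x e).all (fun e2 => decide (-e2 ∈ a)))) = true →
      pvAddElement x e ∈ pvInner a full vs x xs := by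
  induction vs generalizing xs with
  | nil => intro v hv; exact absurd hv (List.not_mem_nil)
  | cons v0 tl ih =>
    intro v hv e he h1 h2 h3
    show pvAddElement x e ∈ tl.foldl _ ([v0, -v0].foldl (pvStep a full x) xs)
    rcases List.mem_cons.mp hv with rfl | hvtl
    · have hmem : pvAddElement x e ∈ [v, -v].foldl (pvStep a full x) xs := by
        simp only [List.foldl_cons, List.foldl_nil]
        rcases List.mem_cons.mp he with rfl | he'
        · exact (pv_step_prefix a full x _ (-e)).subset
            (pv_step_mem_child a full x xs e h1 h2 h3)
        · rw [List.mem_singleton] at he'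
          subst he'
          exact pv_step_mem_child a full x _ (-v) h1 h2 h3
      exact (pv_inner_prefix a full tl x _).subset hmem
    · exact ih _ v hvtl e he h1 h2 h3

lemma pv_good_pairwise {a : List Int} {k : Int} {full : Bool} {y : List Int}
    (h : pvGood a k full y) : y.Pairwise (fun p q => |p| < |q|) := by
  rcases h with rfl | h
  · exact List.Pairwise.nil
  · exact h.1

lemma pv_card_bound (a : List Int) (k : Int) (full : Bool) (xs : List (List Int))
    (h : pvInv a k full xs) :
    xs.length ≤ 2 ^ (2 * (PySem.Set.ofList (a.map (fun e => |e|))).length) := by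
  classical
  obtain ⟨hnd, hgood⟩ := h
  set vars := PySem.Set.ofList (a.map (fun e => |e|)) with hvars
  set L : List Int := vars ++ vars.map (fun v => -v) with hL
  have hsub : ∀ y ∈ xs, y.toFinset ⊆ L.toFinset := by
    intro y hy z hz
    rw [List.mem_toFinset] at hz ⊢
    have hz2 : |z| ∈ a.map (fun e => |e|) := by
      rcases hgood y hy with rfl | hg
      · exact absurd hz (List.not_mem_nil)
      · exact hg.2.1 z hz
    have hzv : |z| ∈ vars := (PySem.Set.mem_ofList _ _).mpr hz2
    rcases abs_choice z with he | he
    · exact List.mem_append_left _ (he ▸ hzv)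
    · exact List.mem_append_right _ (List.mem_map.mpr ⟨|z|, hzv, by omega⟩)
  have hinj : ∀ y1 ∈ xs, ∀ y2 ∈ xs, y1.toFinset = y2.toFinset → y1 = y2 := by
    intro y1 h1 y2 h2 heq
    have hp1 := pv_good_pairwise (hgood y1 h1)
    have hp2 := pv_good_pairwise (hgood y2 h2)
    have hperm := List.perm_of_nodup_nodup_toFinset_eq
      (pv_pairwise_nodup hp1) (pv_pairwise_nodup hp2) heq
    exact hperm.eq_of_pairwise (fun p q _ _ hpq hqp => by omega) hp1 hp2
  have hmapnd : (xs.map List.toFinset).Nodup := List.Nodup.map_on hinj hnd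
  have hLlen : L.toFinset.card ≤ 2 * vars.length := by
    refine le_trans (List.toFinset_card_le L) ?_
    simp [hL]
    omega
  calc xs.length = (xs.map List.toFinset).length := (List.length_map ..).symm
    _ = (xs.map List.toFinset).toFinset.card := (List.toFinset_card_of_nodup hmapnd).symm
    _ ≤ (L.toFinset.powerset).card := by
        refine Finset.card_le_card ?_
        intro S hS
        rw [List.mem_toFinset, List.mem_map] at hS
        obtain ⟨y, hy, rfl⟩ := hS
        exact Finset.mem_powerset.mpr (hsub y hy)
    _ = 2 ^ L.toFinset.card := Finset.card_powerset _
    _ ≤ 2 ^ (2 * vars.length) := Nat.pow_le_pow_right (by norm_num) hLlen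

lemma pv_loop_main (a : List Int) (k : Int) (full : Bool) :
    ∀ (fuel i : Nat) (xs : List (List Int)), pvInv a k full xs → i ≤ xs.length →
      (∀ x ∈ xs.take i, pvChildCond a k full x xs) →
      2 ^ (2 * (PySem.Set.ofList (a.map (fun e => |e|))).length) + 1 ≤ fuel + i →
      xs <+: pvLoopA a k full (PySem.Set.ofList (a.map (fun e => |e|))) fuel i xs ∧
      pvInv a k full (pvLoopA a k full (PySem.Set.ofList (a.map (fun e => |e|))) fuel i xs) ∧
      ∀ x ∈ pvLoopA a k full (PySem.Set.ofList (a.map (fun e => |e|))) fuel i xs,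
        pvChildCond a k full x (pvLoopA a k full (PySem.Set.ofList (a.map (fun e => |e|))) fuel i xs) := by
  intro fuel
  induction fuel with
  | zero =>
    intro i xs hinv hi hproc hfuel
    have hb := pv_card_bound a k full xs hinv
    omega
  | succ fuel ih =>
    intro i xs hinv hi hproc hfuel
    by_cases h : i < xs.length
    · simp only [pvLoopA, dif_pos h]
      set x := xs[i] with hxdef
      set xs' := if (x.length : Int) < k then
        pvInner a full (PySem.Set.ofList (a.map (fun e => |e|))) x xs else xs with hxs'
      have hgx : pvGood a k full x := hinv.2 x (List.getElem_mem h)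
      have hpre : xs <+: xs' := by
        rw [hxs']
        split_ifs
        · exact pv_inner_prefix a full _ x xs
        · exact List.prefix_rfl
      have hinv' : pvInv a k full xs' := by
        rw [hxs']
        split_ifs with hk
        · refine pv_inner_inv a k full _ x xs ?_ (pv_good_pairwise hgx) ?_ hk hinv
          · intro v hv
            have hv2 := (PySem.Set.mem_ofList _ _).mp hv
            refine ⟨hv2, ?_⟩
            obtain ⟨w, _, rfl⟩ := List.mem_map.mp hv2
            positivity
          · rcases hgx with hge | hg
            · intro e' he'; rw [hge] at he'; exact absurd he' (List.not_mem_nil)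
            · exact hg.2.1
        · exact hinv
      have hproc' : ∀ x' ∈ xs'.take (i+1), pvChildCond a k full x' xs' := by
        have htake : xs'.take (i+1) = xs.take i ++ [x] := by
          obtain ⟨t, ht⟩ := hpre
          rw [← ht, List.take_append_of_le_length (by omega),
            List.take_succ_eq_append_getElem h]
        rw [htake]
        intro x' hx'
        rcases List.mem_append.mp hx' with hh | hh
        · intro hlk v hv e he h1 h2 h3
          exact hpre.subset (hproc x' hh hlk v hv e he h1 h2 h3)
        · rw [List.mem_singleton] at hh
          subst hh
          intro hlk v hv e he h1 h2 h3
          have hxx : xs' = pvInner a full (PySem.Set.ofList (a.map (fun e => |e|))) x xs := by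
            rw [hxs', if_pos hlk]
          rw [hxx]
          exact pv_inner_closed a full _ x xs v hv e he h1 h2 h3
      have hlen' : i + 1 ≤ xs'.length := by
        have := hpre.length_le
        omega
      have hfuel' : 2 ^ (2 * (PySem.Set.ofList (a.map (fun e => |e|))).length) + 1 ≤ fuel + (i+1) := by
        omega
      obtain ⟨hp, hi2, hc⟩ := ih (i+1) xs' hinv' hlen' hproc' hfuel'
      exact ⟨hpre.trans hp, hi2, hc⟩
    · simp only [pvLoopA, dif_neg h]
      refine ⟨List.prefix_rfl, hinv, ?_⟩
      intro x hx
      exact hproc x (by rw [List.take_of_length_le (by omega)]; exact hx)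

lemma pv_complete (a : List Int) (k : Int) (full : Bool) (F : List (List Int))
    (hnil : [] ∈ F) (hcl : ∀ x ∈ F, pvChildCond a k full x F) :
    ∀ (n : Nat) (y : List Int), y.length = n → y.Pairwise (fun p q => |p| < |q|) →
      (∀ e ∈ y, |e| ∈ a.map (fun e => |e|)) → (y.length : Int) ≤ k →
      (full = true ∨ ∃ e ∈ y, -e ∉ a) → y ∈ F := by
  intro n
  induction n using Nat.strong_induction_on with
  | _ n IH =>
    intro y hlen hpw hv hk hpass
    cases y with
    | nil => exact hnil
    | cons c t =>
      simp only [List.length_cons] at hlen hk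
      have hnd := pv_pairwise_nodup hpw
      have hvc : |c| ∈ PySem.Set.ofList (a.map (fun e => |e|)) :=
        (PySem.Set.mem_ofList _ _).mpr (hv c (List.mem_cons_self ..))
      have hec : c ∈ [|c|, -(|c|)] := by
        rcases abs_choice c with hcc | hcc <;> simp [List.mem_cons] <;> omega
      rcases hpass with hfull | ⟨e, hey, hea⟩
      · -- full: recurse on the tail
        have hct : c ∉ t := (List.nodup_cons.mp hnd).1
        have hnct : -c ∉ t := by
          intro hmem
          have hrel := List.rel_of_pairwise_cons hpw hmem
          rw [abs_neg] at hrel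
          omega
        have htpw := hpw.of_cons
        have htF : t ∈ F := by
          refine IH t.length (by omega) t rfl htpw
            (fun e' he' => hv e' (List.mem_cons_of_mem _ he')) (by omega)
            (Or.inl hfull)
        have heq : pvAddElement t c = c :: t :=
          pv_addElement_eq htpw hct (List.perm_append_singleton c t).symm hpw
        have hres := hcl t htF (by omega) (|c|) hvc c hec hct hnct
          (by rw [heq]; exact (pv_pass_bool a full _).mpr (Or.inl hfull))
        rwa [heq] at hres
      · -- a non-falsified literal e is kept in every recursive step
        by_cases ht0 : t = []
        · subst ht0
          rw [List.mem_singleton] at hey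
          subst hey
          have heq : pvAddElement [] e = [e] :=
            pv_addElement_eq List.Pairwise.nil (List.not_mem_nil) (by simp) hpw
          have hres := hcl [] hnil (by simp; omega) (|e|) hvc e hec
            (List.not_mem_nil) (List.not_mem_nil)
            (by rw [heq]; exact (pv_pass_bool a full [e]).mpr (Or.inr ⟨e, List.mem_singleton_self e, hea⟩))
          rwa [heq] at hres
        · -- erase some e' ≠ e and recurse
          have herase_ne : (c :: t).erase e ≠ [] := by
            have hle := List.length_erase_of_mem hey
            intro hh
            rw [hh] at hle
            simp at hle
            have : t.length = 0 := by omega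
            exact ht0 (List.eq_nil_of_length_eq_zero this)
          obtain ⟨e', he'⟩ := List.exists_mem_of_ne_nil _ herase_ne
          have he'y : e' ∈ c :: t := List.mem_of_mem_erase he'
          have he'ne : e' ≠ e := (hnd.mem_erase_iff.mp he').1
          have hppw : ((c :: t).erase e').Pairwise (fun p q => |p| < |q|) :=
            List.Pairwise.sublist (List.erase_sublist) hpw
          have hpe : e ∈ (c :: t).erase e' :=
            hnd.mem_erase_iff.mpr ⟨fun hh => he'ne hh.symm, hey⟩
          have hplen : ((c :: t).erase e').length = t.length := by
            rw [List.length_erase_of_mem he'y]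
            simp
          have hpF : (c :: t).erase e' ∈ F := by
            refine IH ((c :: t).erase e').length (by omega) _ rfl hppw
              (fun w hw => hv w (List.mem_of_mem_erase hw)) (by omega)
              (Or.inr ⟨e, hpe, hea⟩)
          have he'p : e' ∉ (c :: t).erase e' := by
            intro hh
            exact ((hnd.mem_erase_iff.mp hh).1 rfl).elim
          have hne'p : -e' ∉ (c :: t).erase e' := by
            intro hh
            have hy' : -e' ∈ c :: t := List.mem_of_mem_erase hh
            by_cases hz : -e' = e'
            · rw [hz] at hh; exact he'p hh
            · have hmnd := pv_map_abs_nodup hpw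
              have := List.inj_on_of_nodup_map hmnd hy' he'y (by rw [abs_neg])
              exact hz this
          have hv' : |e'| ∈ PySem.Set.ofList (a.map (fun e => |e|)) :=
            (PySem.Set.mem_ofList _ _).mpr (hv e' he'y)
          have he'mem : e' ∈ [|e'|, -(|e'|)] := by
            rcases abs_choice e' with hcc | hcc <;> simp [List.mem_cons] <;> omega
          have heq : pvAddElement ((c :: t).erase e') e' = c :: t :=
            pv_addElement_eq hppw he'p
              ((List.perm_cons_erase he'y).trans
                (List.perm_append_singleton e' _).symm) hpw
          have hres := hcl _ hpF (by omega) (|e'|) hv' e' he'mem he'p hne'p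
            (by rw [heq]; exact (pv_pass_bool a full _).mpr (Or.inr ⟨e, hey, hea⟩))
          rwa [heq] at hres

lemma pv_A_eq (a : List Int) (j k : Int) (full : Bool) :
    generate_full_alt a j k full =
      PySem.List.sorted
        (PySem.Set.ofList
          ((pvLoopA a k full (PySem.Set.ofList (a.map (fun e => |e|)))
              (2 ^ (2 * (PySem.Set.ofList (a.map (fun e => |e|))).length) + 1) 0 [[]]).filter
            (fun x => decide (j ≤ (x.length : Int)) && decide ((x.length : Int) ≤ k))))
        (fun x => x) := rfl

lemma pv_loopF (a : List Int) (k : Int) (full : Bool) :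
    [] ∈ pvLoopA a k full (PySem.Set.ofList (a.map (fun e => |e|)))
        (2 ^ (2 * (PySem.Set.ofList (a.map (fun e => |e|))).length) + 1) 0 [[]] ∧
    pvInv a k full (pvLoopA a k full (PySem.Set.ofList (a.map (fun e => |e|)))
        (2 ^ (2 * (PySem.Set.ofList (a.map (fun e => |e|))).length) + 1) 0 [[]]) ∧
    ∀ x ∈ pvLoopA a k full (PySem.Set.ofList (a.map (fun e => |e|)))
        (2 ^ (2 * (PySem.Set.ofList (a.map (fun e => |e|))).length) + 1) 0 [[]],
      pvChildCond a k full x (pvLoopA a k full (PySem.Set.ofList (a.map (fun e => |e|)))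
        (2 ^ (2 * (PySem.Set.ofList (a.map (fun e => |e|))).length) + 1) 0 [[]]) := by
  have hinv0 : pvInv a k full [[]] := by
    refine ⟨by simp, ?_⟩
    intro z hz
    rw [List.mem_singleton] at hz
    subst hz
    exact Or.inl rfl
  obtain ⟨hpre, hinvF, hclF⟩ := pv_loop_main a k full
    (2 ^ (2 * (PySem.Set.ofList (a.map (fun e => |e|))).length) + 1) 0 [[]] hinv0
    (by simp) (by simp) (by omega)
  exact ⟨hpre.subset (List.mem_singleton_self _), hinvF, hclF⟩

lemma pv_memA (a : List Int) (j k : Int) (full : Bool) (y : List Int) :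
    y ∈ generate_full_alt a j k full ↔ pvOK a j k full y := by
  obtain ⟨hnilF, hinvF, hclF⟩ := pv_loopF a k full
  rw [pv_A_eq, PySem.List.mem_sorted, PySem.Set.mem_ofList, List.mem_filter]
  simp only [pvOK, pvCanon, Bool.and_eq_true, decide_eq_true_eq]
  constructor
  · rintro ⟨hyF, hj, hk2⟩
    rcases hinvF.2 y hyF with rfl | hg
    · exact ⟨⟨List.Pairwise.nil, by simp⟩, hj, hk2, Or.inl rfl⟩
    · exact ⟨⟨hg.1, hg.2.1⟩, hj, hk2, Or.inr hg.2.2.2.2⟩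
  · rintro ⟨⟨hpw, hvv⟩, hj, hk2, hor⟩
    refine ⟨?_, hj, hk2⟩
    rcases hor with rfl | hpass
    · exact hnilF
    · exact pv_complete a k full _ hnilF hclF y.length y rfl hpw hvv hk2 hpass

-- B-side characterisation
lemma pv_mem_signedChoices (vs : List Int) (hv : ∀ v ∈ vs, 0 ≤ v) :
    ∀ (s : Nat) (c : List Int),
      c ∈ pvSignedChoices vs s ↔ c.length = s ∧ (c.map (fun e => |e|)).Sublist vs := by
  induction vs with
  | nil =>
    intro s c
    cases s with
    | zero =>
      simp only [pvSignedChoices, List.mem_singleton]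
      constructor
      · rintro rfl; exact ⟨rfl, List.nil_sublist _⟩
      · rintro ⟨hlen, _⟩; exact List.eq_nil_of_length_eq_zero hlen
    | succ s =>
      simp only [pvSignedChoices]
      constructor
      · intro h; exact absurd h (List.not_mem_nil)
      · rintro ⟨hlen, hsub⟩
        have := List.sublist_nil.mp hsub
        rw [List.map_eq_nil_iff] at this
        subst this
        simp at hlen
  | cons v rest ih =>
    intro s c
    cases s with
    | zero =>
      simp only [pvSignedChoices, List.mem_singleton]
      constructor
      · rintro rfl; exact ⟨rfl, List.nil_sublist _⟩
      · rintro ⟨hlen, _⟩; exact List.eq_nil_of_length_eq_zero hlen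
    | succ s =>
      obtain ⟨hv0, hvrest⟩ : 0 ≤ v ∧ ∀ w ∈ rest, 0 ≤ w :=
        ⟨hv v (List.mem_cons_self ..), fun w hw => hv w (List.mem_cons_of_mem _ hw)⟩
      simp only [pvSignedChoices, List.mem_append, List.mem_flatMap, List.mem_map,
        List.mem_cons, List.not_mem_nil, or_false]
      constructor
      · rintro (⟨e, he, t, ht, rfl⟩ | hc)
        · obtain ⟨hlent, hsubt⟩ := (ih hvrest s t).mp ht
          have habs : |e| = v := by
            rcases he with rfl | rfl
            · exact abs_of_nonneg hv0
            · rw [abs_neg]; exact abs_of_nonneg hv0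
          refine ⟨by simp [hlent], ?_⟩
          simp only [List.map_cons, habs]
          exact List.cons_sublist_cons.mpr hsubt
        · obtain ⟨hlenc, hsubc⟩ := (ih hvrest (s+1) c).mp hc
          exact ⟨hlenc, hsubc.cons v⟩
      · rintro ⟨hlenc, hsubc⟩
        cases c with
        | nil => simp at hlenc
        | cons e t =>
          simp only [List.map_cons] at hsubc
          rcases List.sublist_cons_iff.mp hsubc with hs | ⟨r, hr, hrs⟩
          · refine Or.inr ((ih hvrest (s+1) (e :: t)).mpr ⟨hlenc, ?_⟩)
            simpa using hs
          · simp only [List.cons.injEq] at hr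
            obtain ⟨habs, hmap⟩ := hr
            refine Or.inl ⟨e, ?_, t, (ih hvrest s t).mpr ⟨by simpa using hlenc, hmap ▸ hrs⟩, rfl⟩
            rcases (abs_eq hv0).mp habs with rfl | rfl
            · exact Or.inl rfl
            · exact Or.inr rfl

lemma pv_sublist_of (vs : List Int) (hvs : vs.Pairwise (· < ·)) :
    ∀ m : List Int, m.Pairwise (· < ·) → (∀ x ∈ m, x ∈ vs) → m.Sublist vs := by
  induction vs with
  | nil =>
    intro m _ hmem
    cases m with
    | nil => exact List.Sublist.refl _
    | cons x m' => exact absurd (hmem x (List.mem_cons_self ..)) (List.not_mem_nil)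
  | cons v rest ih =>
    intro m hm hmem
    cases m with
    | nil => exact List.nil_sublist _
    | cons x m' =>
      by_cases hxv : x = v
      · subst hxv
        refine List.cons_sublist_cons.mpr (ih hvs.of_cons m' hm.of_cons ?_)
        intro z hz
        have hzvs := hmem z (List.mem_cons_of_mem _ hz)
        rcases List.mem_cons.mp hzvs with rfl | hr
        · have := List.rel_of_pairwise_cons hm hz
          omega
        · exact hr
      · refine (ih hvs.of_cons (x :: m') hm ?_).cons v
        intro z hz
        have hzvs := hmem z hz
        rcases List.mem_cons.mp hzvs with rfl | hr
        · exfalso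
          rcases List.mem_cons.mp (hmem x (List.mem_cons_self ..)) with rfl | hxr
          · exact hxv rfl
          · have h1 := List.rel_of_pairwise_cons hvs hxr
            rcases List.mem_cons.mp hz with rfl | hz'
            · exact hxv rfl
            · have h2 := List.rel_of_pairwise_cons hm hz'
              omega
        · exact hr

lemma pv_sublist_iff (vs : List Int) (hvs : vs.Pairwise (· < ·)) (m : List Int) :
    m.Sublist vs ↔ m.Pairwise (· < ·) ∧ ∀ x ∈ m, x ∈ vs := by
  constructor
  · intro h
    exact ⟨List.Pairwise.sublist h hvs, fun x hx => h.subset hx⟩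
  · rintro ⟨h1, h2⟩
    exact pv_sublist_of vs hvs m h1 h2

lemma pv_mem_foldl_addif (L : List (List Int)) (p : List Int → Bool)
    (r0 : List (List Int)) (w : List Int) :
    w ∈ L.foldl (fun r c => if p c then PySem.Set.add r c else r) r0 ↔
      w ∈ r0 ∨ (w ∈ L ∧ p w = true) := by
  induction L generalizing r0 with
  | nil => simp
  | cons c L ih =>
    simp only [List.foldl_cons]
    by_cases hpc : p c = true
    · rw [if_pos hpc, ih]
      simp only [PySem.Set.mem_add]
      constructor
      · rintro ((hw | rfl) | ⟨hw1, hw2⟩)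
        · exact Or.inl hw
        · exact Or.inr ⟨List.mem_cons_self .., hpc⟩
        · exact Or.inr ⟨List.mem_cons_of_mem _ hw1, hw2⟩
      · rintro (hw | ⟨hw1, hw2⟩)
        · exact Or.inl (Or.inl hw)
        · rcases List.mem_cons.mp hw1 with rfl | hw3
          · exact Or.inl (Or.inr rfl)
          · exact Or.inr ⟨hw3, hw2⟩
    · rw [if_neg hpc, ih]
      constructor
      · rintro (hw | ⟨hw1, hw2⟩)
        · exact Or.inl hw
        · exact Or.inr ⟨List.mem_cons_of_mem _ hw1, hw2⟩
      · rintro (hw | ⟨hw1, hw2⟩)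
        · exact Or.inl hw
        · rcases List.mem_cons.mp hw1 with rfl | hw3
          · exact absurd hw2 hpc
          · exact Or.inr ⟨hw3, hw2⟩

lemma pv_nodup_foldl_addif (L : List (List Int)) (p : List Int → Bool)
    (r0 : List (List Int)) (h : r0.Nodup) :
    (L.foldl (fun r c => if p c then PySem.Set.add r c else r) r0).Nodup := by
  induction L generalizing r0 with
  | nil => exact h
  | cons c L ih =>
    simp only [List.foldl_cons]
    split_ifs
    · exact ih _ (PySem.Set.nodup_add r0 c h)
    · exact ih _ h

lemma pv_mem_foldl_outer (vs : List Int) (p : List Int → Bool) (ss : List Int)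
    (r0 : List (List Int)) (w : List Int) :
    w ∈ ss.foldl (fun r s => (pvSignedChoices vs s.toNat).foldl
        (fun r c => if p c then PySem.Set.add r c else r) r) r0 ↔
      w ∈ r0 ∨ ∃ s ∈ ss, w ∈ pvSignedChoices vs s.toNat ∧ p w = true := by
  induction ss generalizing r0 with
  | nil => simp
  | cons s ss ih =>
    simp only [List.foldl_cons]
    rw [ih, pv_mem_foldl_addif]
    constructor
    · rintro ((hw | ⟨h1, h2⟩) | ⟨s', hs', h1, h2⟩)
      · exact Or.inl hw
      · exact Or.inr ⟨s, List.mem_cons_self .., h1, h2⟩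
      · exact Or.inr ⟨s', List.mem_cons_of_mem _ hs', h1, h2⟩
    · rintro (hw | ⟨s', hs', h1, h2⟩)
      · exact Or.inl (Or.inl hw)
      · rcases List.mem_cons.mp hs' with rfl | hs2
        · exact Or.inl (Or.inr ⟨h1, h2⟩)
        · exact Or.inr ⟨s', hs2, h1, h2⟩

lemma pv_nodup_foldl_outer (vs : List Int) (p : List Int → Bool) (ss : List Int)
    (r0 : List (List Int)) (h : r0.Nodup) :
    (ss.foldl (fun r s => (pvSignedChoices vs s.toNat).foldl
        (fun r c => if p c then PySem.Set.add r c else r) r) r0).Nodup := by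
  induction ss generalizing r0 with
  | nil => exact h
  | cons s ss ih =>
    simp only [List.foldl_cons]
    exact ih _ (pv_nodup_foldl_addif _ p _ h)

lemma pv_B_eq (a : List Int) (j k : Int) (full : Bool) :
    generate_full_alt_alt a j k full =
      PySem.List.sorted
        ((PySem.List.pyRange (max j 1)
          (min k ((PySem.List.sorted (PySem.Set.ofList (a.map (fun e => |e|)))
            (fun v => v)).length : Int) + 1)).foldl
          (fun res s => (pvSignedChoices
              (PySem.List.sorted (PySem.Set.ofList (a.map (fun e => |e|))) (fun v => v))
              s.toNat).foldl
            (fun res c => if full || !(c.all (fun e => decide (-e ∈ a)))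
              then PySem.Set.add res c else res) res)
          (if j ≤ 0 ∧ 0 ≤ k then PySem.Set.add PySem.Set.empty [] else PySem.Set.empty))
        (fun x => x) := rfl

lemma pv_res0_nodup (j k : Int) :
    ((if j ≤ 0 ∧ 0 ≤ k then PySem.Set.add PySem.Set.empty ([] : List Int)
      else PySem.Set.empty) : List (List Int)).Nodup := by
  split_ifs
  · exact PySem.Set.nodup_add _ _ (by simp [PySem.Set.empty])
  · simp [PySem.Set.empty]

lemma pv_memB (a : List Int) (j k : Int) (full : Bool) (y : List Int) :
    y ∈ generate_full_alt_alt a j k full ↔ pvOK a j k full y := by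
  have hpairvs := PySem.List.sorted_ofList_pairwise_lt (a.map (fun e => |e|))
  have hmemvs : ∀ x : Int, x ∈ PySem.List.sorted (PySem.Set.ofList (a.map (fun e => |e|)))
      (fun v => v) ↔ x ∈ a.map (fun e => |e|) := by
    intro x
    rw [PySem.List.mem_sorted, PySem.Set.mem_ofList]
  have hv0 : ∀ v ∈ PySem.List.sorted (PySem.Set.ofList (a.map (fun e => |e|)))
      (fun v => v), 0 ≤ v := by
    intro v hv
    obtain ⟨w, _, rfl⟩ := List.mem_map.mp ((hmemvs v).mp hv)
    positivity
  rw [pv_B_eq, PySem.List.mem_sorted, pv_mem_foldl_outer]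
  have hres0 : ∀ w : List Int, w ∈ (if j ≤ 0 ∧ 0 ≤ k
      then PySem.Set.add PySem.Set.empty ([] : List Int) else PySem.Set.empty) ↔
      (w = [] ∧ j ≤ 0 ∧ 0 ≤ k) := by
    intro w
    split_ifs with h0
    · rw [PySem.Set.mem_add]
      simp [PySem.Set.empty, h0]
    · simp [PySem.Set.empty, h0]
  rw [hres0]
  simp only [pv_mem_signedChoices _ hv0, PySem.List.mem_pyRange_one]
  have hcan : (y.map (fun e => |e|)).Sublist
      (PySem.List.sorted (PySem.Set.ofList (a.map (fun e => |e|))) (fun v => v)) ↔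
      pvCanon a y := by
    rw [pv_sublist_iff _ hpairvs]
    simp only [pvCanon, List.pairwise_map]
    constructor
    · rintro ⟨h1, h2⟩
      exact ⟨h1, fun e he => (hmemvs _).mp (h2 _ (List.mem_map_of_mem he))⟩
    · rintro ⟨h1, h2⟩
      refine ⟨h1, ?_⟩
      intro x hx
      obtain ⟨e, he, rfl⟩ := List.mem_map.mp hx
      exact (hmemvs _).mpr (h2 e he)
  simp only [pvOK]
  constructor
  · rintro (⟨rfl, hj, hk2⟩ | ⟨s, ⟨hs1, hs2⟩, ⟨hlen, hsub⟩, hpb⟩)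
    · exact ⟨⟨List.Pairwise.nil, by simp⟩, by simpa using hj, by simpa using hk2, Or.inl rfl⟩
    · have hs0 : 1 ≤ s := le_trans (by omega) hs1
      have hlen' : (y.length : Int) = s := by omega
      have hmj : max j 1 ≤ (y.length : Int) := by omega
      refine ⟨hcan.mp hsub, by omega, by omega, Or.inr ?_⟩
      exact (pv_pass_bool a full y).mp hpb
  · rintro ⟨hcanon, hj, hk2, hor⟩
    by_cases hy0 : y = []
    · subst hy0
      exact Or.inl ⟨rfl, by simpa using hj, by simpa using hk2⟩
    · have hpos : 0 < y.length := List.length_pos_iff.mpr hy0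
      have hpass : pvPass a full y := by
        rcases hor with rfl | hp
        · exact absurd rfl hy0
        · exact hp
      have hlenvs : y.length ≤ (PySem.List.sorted (PySem.Set.ofList (a.map (fun e => |e|)))
          (fun v => v)).length := by
        simpa using (hcan.mpr hcanon).length_le
      refine Or.inr ⟨(y.length : Int), ⟨by omega, by omega⟩, ⟨by omega, hcan.mpr hcanon⟩,
        (pv_pass_bool a full y).mpr hpass⟩

lemma pv_nodupA (a : List Int) (j k : Int) (full : Bool) :
    (generate_full_alt a j k full).Nodup := by
  rw [pv_A_eq]
  exact (PySem.List.sorted_perm _ _ _).nodup_iff.mpr (PySem.Set.nodup_ofList _)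

lemma pv_nodupB (a : List Int) (j k : Int) (full : Bool) :
    (generate_full_alt_alt a j k full).Nodup := by
  rw [pv_B_eq]
  exact (PySem.List.sorted_perm _ _ _).nodup_iff.mpr
    (pv_nodup_foldl_outer _ _ _ _ (pv_res0_nodup j k))

-- ===== VERDICT (by name: the statement is the Claim_ definition above) =====
theorem generate_full_alt_spec : Claim_equal_generate_full_alt := by
  unfold Claim_equal_generate_full_alt
  intro a j k full _
  unfold Spec_generate_full_alt
  have hA := pv_nodupA a j k full
  have hB := pv_nodupB a j k full
  rw [pv_A_eq] at hA
  rw [pv_B_eq] at hB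
  rw [pv_A_eq, pv_B_eq]
  have hperm : (PySem.Set.ofList
      ((pvLoopA a k full (PySem.Set.ofList (a.map (fun e => |e|)))
          (2 ^ (2 * (PySem.Set.ofList (a.map (fun e => |e|))).length) + 1) 0 [[]]).filter
        (fun x => decide (j ≤ (x.length : Int)) && decide ((x.length : Int) ≤ k)))).Perm
      ((PySem.List.pyRange (max j 1)
          (min k ((PySem.List.sorted (PySem.Set.ofList (a.map (fun e => |e|)))
            (fun v => v)).length : Int) + 1)).foldl
        (fun res s => (pvSignedChoices
            (PySem.List.sorted (PySem.Set.ofList (a.map (fun e => |e|))) (fun v => v))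
            s.toNat).foldl
          (fun res c => if full || !(c.all (fun e => decide (-e ∈ a)))
            then PySem.Set.add res c else res) res)
        (if j ≤ 0 ∧ 0 ≤ k then PySem.Set.add PySem.Set.empty [] else PySem.Set.empty)) := by
    refine (List.perm_ext_iff_of_nodup ((PySem.List.sorted_perm _ _ _).nodup_iff.mp hA)
      ((PySem.List.sorted_perm _ _ _).nodup_iff.mp hB)).mpr ?_
    intro w
    have h1 := pv_memA a j k full w
    have h2 := pv_memB a j k full w
    rw [pv_A_eq, PySem.List.mem_sorted] at h1
    rw [pv_B_eq, PySem.List.mem_sorted] at h2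
    rw [h1, h2]
  have key := PySem.List.sorted_eq_sorted_of_perm (α := List Int) (κ := List Int) _ _
    (fun x => x) (fun _ _ h => h) hperm
  convert key using 2
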